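-- pv_equiv track=rewrite | github.com/hambaR34/HobbyRecommener | app.py | calculate_raw_score
-- ===== SOURCE A (Python) =====
-- def calculate_raw_score(row):
--     raw_score = 0
--     for i in range(len(row)):
--         if i % 2 == 0:  # Odd-numbered question
--             odd_score = row[i] - 1
--             raw_score += odd_score
--         else:  # Even-numbered question
--             even_score = 5 - row[i]
--             raw_score += even_score
--     return raw_score
-- ===== SOURCE B (Python) =====
-- def calculate_raw_score(row):
--     evens = row[0::2]
--     odds = row[1::2]
--     return (sum(evens) - len(evens)) + (5 * len(odds) - sum(odds))
-- ===== Notes on version B (the rewrite author's own statement) =====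
-- stated objective: simpler
-- what changed: Replaces the index loop with its parity branch by two strided slices and a closed-form expression: sum(evens)-len(evens) + 5*len(odds)-sum(odds).
import Mathlib
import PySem

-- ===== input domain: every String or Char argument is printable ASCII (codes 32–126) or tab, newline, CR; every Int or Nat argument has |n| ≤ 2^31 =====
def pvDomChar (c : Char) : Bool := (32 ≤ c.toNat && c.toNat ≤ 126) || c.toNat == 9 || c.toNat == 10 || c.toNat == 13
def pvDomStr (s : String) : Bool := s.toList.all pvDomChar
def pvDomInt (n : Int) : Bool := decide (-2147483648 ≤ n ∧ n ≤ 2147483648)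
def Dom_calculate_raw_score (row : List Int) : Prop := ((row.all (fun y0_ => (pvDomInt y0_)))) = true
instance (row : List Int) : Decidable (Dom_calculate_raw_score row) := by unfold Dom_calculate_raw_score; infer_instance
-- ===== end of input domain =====

-- B replaces A's index loop with its parity branch by two strided slices and a closed-form expression (simpler decomposition, same cost).


-- ===== PORT A =====
def calculate_raw_score (row : List Int) : Int :=
  (PySem.List.pyRange 0 (row.length : Int) 1).foldl
    (fun raw_score i =>
      if i % 2 == 0 then raw_score + (PySem.List.pyGetD row i 0 - 1)
      else raw_score + (5 - PySem.List.pyGetD row i 0)) 0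

-- ===== PORT B =====
def calculate_raw_score_alt (row : List Int) : Int :=
  let evens := (PySem.List.slice? row (some 0) none 2).getD []
  let odds := (PySem.List.slice? row (some 1) none 2).getD []
  (evens.sum - (evens.length : Int)) + (5 * (odds.length : Int) - odds.sum)

-- ===== PRECONDITION & SPEC =====
def Spec_calculate_raw_score (row : List Int) (out : Int) : Prop := out = calculate_raw_score_alt row
instance (row : List Int) (out : Int) : Decidable (Spec_calculate_raw_score row out) := by unfold Spec_calculate_raw_score; infer_instance

-- ===== CLAIM (what is proved, stated in full; the proofs are below) =====
def Claim_equal_calculate_raw_score : Prop := ∀ (row : List Int), Dom_calculate_raw_score row → Spec_calculate_raw_score row (calculate_raw_score row)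

-- ===== LEMMAS AND PROOFS =====

/-- elements at even indices -/
def pvEvens : List Int → List Int
  | [] => []
  | [a] => [a]
  | a :: _ :: r => a :: pvEvens r

/-- elements at odd indices -/
def pvOdds (xs : List Int) : List Int := pvEvens xs.tail

lemma pvEvens_cons (y : Int) (ys : List Int) : pvEvens (y :: ys) = y :: pvOdds ys := by
  cases ys <;> rfl

lemma pvOdds_cons (y : Int) (ys : List Int) : pvOdds (y :: ys) = pvEvens ys := rfl

/-- A's alternating accumulation, starting with parity flag `b`. -/
def pvAltP : Bool → List Int → Int
  | _, [] => 0
  | b, y :: ys => (if b then y - 1 else 5 - y) + pvAltP (!b) ys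

lemma pvParityFlip (a : Int) : ((a + 1) % 2 == 0) = !(a % 2 == 0) := by
  rcases Int.emod_two_eq a with h | h
  · have h2 : (a + 1) % 2 = 1 := by omega
    simp [h, h2]
  · have h2 : (a + 1) % 2 = 0 := by omega
    simp [h, h2]

lemma pvLoopA (row : List Int) : ∀ (ys : List Int) (a acc : Int), 0 ≤ a →
    row.drop a.toNat = ys →
    (PySem.List.pyRange a (row.length : Int) 1).foldl
      (fun raw_score i =>
        if i % 2 == 0 then raw_score + (PySem.List.pyGetD row i 0 - 1)
        else raw_score + (5 - PySem.List.pyGetD row i 0)) acc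
      = acc + pvAltP (a % 2 == 0) ys := by
  intro ys
  induction ys with
  | nil =>
    intro a acc ha hd
    have hge : (row.length : Int) ≤ a := by
      have := List.drop_eq_nil_iff.mp hd
      omega
    rw [PySem.List.pyRange_one_eq_nil hge]
    simp [pvAltP]
  | cons y ys ih =>
    intro a acc ha hd
    have hlt : a.toNat < row.length := by
      by_contra h
      rw [List.drop_eq_nil_of_le (by omega)] at hd
      simp at hd
    have haltI : a < (row.length : Int) := by omega
    have hget : PySem.List.pyGetD row a 0 = y := by
      rw [PySem.List.pyGetD_eq_getElem row (d := 0) ha (by exact_mod_cast haltI)]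
      have h0 : (row.drop a.toNat)[0]? = some y := by rw [hd]; rfl
      rw [List.getElem?_drop, Nat.add_zero] at h0
      have := List.getElem?_eq_getElem hlt
      rw [this] at h0
      exact (Option.some.injEq _ _).mp h0
    have hdrop : row.drop (a + 1).toNat = ys := by
      have h1 : (a + 1).toNat = a.toNat + 1 := by omega
      rw [h1, ← List.drop_drop (i := 1), hd, List.drop_one, List.tail_cons]
    rw [PySem.List.pyRange_one_cons haltI]
    simp only [List.foldl_cons]
    rw [ih (a + 1) _ (by omega) hdrop, pvParityFlip]
    cases hb : (a % 2 == 0) <;> simp [hget, pvAltP] <;> ring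

lemma pvA_eq_altP (row : List Int) : calculate_raw_score row = pvAltP true row := by
  unfold calculate_raw_score
  rw [pvLoopA row row 0 0 le_rfl (by simp)]
  norm_num

lemma pvFilterEvens : ∀ xs : List Int,
    List.filterMap (fun k => xs[2 * k]?) (List.range ((xs.length + 1) / 2)) = pvEvens xs := by
  intro xs
  fun_induction pvEvens xs with
  | case1 => simp
  | case2 a => simp [List.range_succ]
  | case3 a b r ih =>
    have hc : (r.length + 2 + 1) / 2 = (r.length + 1) / 2 + 1 := by omega
    simp only [List.length_cons]
    rw [show r.length + 1 + 1 = r.length + 2 by ring, hc,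
        List.range_succ_eq_map, List.filterMap_cons, List.filterMap_map]
    have hstep : ∀ k, ((fun k => (a :: b :: r)[2 * k]?) ∘ Nat.succ) k = (fun k => r[2 * k]?) k := by
      intro k
      simp only [Function.comp_apply]
      have : 2 * Nat.succ k = 2 * k + 1 + 1 := by omega
      rw [this]
      simp [List.getElem?_cons_succ]
    rw [List.filterMap_congr (fun k _ => hstep k), ih]
    rfl

lemma pvSliceEvens (xs : List Int) :
    PySem.List.slice? xs (some 0) none 2 = some (pvEvens xs) := by
  simp only [PySem.List.slice?, PySem.List.sliceIndices]
  norm_num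
  have hcnt : (if 0 < xs.length then (((xs.length : Int) + 2 - 1) / 2).toNat else 0)
      = (xs.length + 1) / 2 := by split <;> omega
  rw [hcnt]
  rw [List.filterMap_congr (fun k _ => by
    have h2 : ((2 * (k : Int))).toNat = 2 * k := by omega
    rw [h2])]
  exact pvFilterEvens xs

lemma pvSliceOdds (xs : List Int) :
    PySem.List.slice? xs (some 1) none 2 = some (pvOdds xs) := by
  cases xs with
  | nil => rfl
  | cons a r =>
    simp only [PySem.List.slice?, PySem.List.sliceIndices]
    norm_num
    have hcnt : (if 0 < r.length then (((r.length : Int) + 2 - 1) / 2).toNat else 0)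
        = (r.length + 1) / 2 := by split <;> omega
    rw [hcnt]
    rw [List.filterMap_congr (fun k _ => by
      have h2 : ((1 + 2 * (k : Int))).toNat = 2 * k + 1 := by omega
      rw [h2, List.getElem?_cons_succ])]
    exact pvFilterEvens r

lemma pvAltP_formula : ∀ xs : List Int,
    (pvAltP true xs =
      ((pvEvens xs).sum - ((pvEvens xs).length : Int)) +
      (5 * ((pvOdds xs).length : Int) - (pvOdds xs).sum)) ∧
    (pvAltP false xs =
      (5 * ((pvEvens xs).length : Int) - (pvEvens xs).sum) +
      ((pvOdds xs).sum - ((pvOdds xs).length : Int))) := by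
  intro xs
  induction xs with
  | nil => simp [pvAltP, pvEvens, pvOdds]
  | cons y ys ih =>
    rw [pvEvens_cons, pvOdds_cons]
    constructor
    · show (y - 1) + pvAltP false ys = _
      rw [ih.2]
      simp only [List.sum_cons, List.length_cons]
      push_cast; ring
    · show (5 - y) + pvAltP true ys = _
      rw [ih.1]
      simp only [List.sum_cons, List.length_cons]
      push_cast; ring

-- ===== VERDICT (by name: the statement is the Claim_ definition above) =====
theorem calculate_raw_score_spec : Claim_equal_calculate_raw_score := by
  intro row _
  show calculate_raw_score row = calculate_raw_score_alt row
  rw [pvA_eq_altP]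
  unfold calculate_raw_score_alt
  rw [pvSliceEvens, pvSliceOdds]
  exact (pvAltP_formula row).1
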